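-- pv_equiv track=rewrite | github.com/aiLi0617/Python-Tool | 版本对比/版本对比-tag-获取tag登记.py | sort_by_tag_frequency
-- ===== SOURCE A (Python) =====
-- from collections import Counter
--
-- def sort_by_tag_frequency(pairs):
--     if not pairs:
--         return []
--     value_count = Counter(v for v, _ in pairs)
--     duplicates = []
--     uniques = []
--     for v, k in pairs:
--         if value_count[v] >= 2:
--             duplicates.append((v, k))
--         else:
--             uniques.append((v, k))
--     duplicates.sort(key=lambda x: (x[0], x[1]))
--     uniques.sort(key=lambda x: (x[0], x[1]))
--     return duplicates + uniques
-- ===== SOURCE B (Python) =====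
-- from collections import Counter
--
-- def sort_by_tag_frequency(pairs):
--     value_count = Counter(v for v, _ in pairs)
--     ordered = sorted(pairs)
--     return sorted(ordered, key=lambda p: value_count[p[0]] < 2)
-- ===== Notes on version B (the rewrite author's own statement) =====
-- stated objective: simpler
-- what changed: Replaces the partition-into-two-lists loop plus two separate sorts by one lexicographic sort of all pairs followed by a stable re-sort on the boolean 'value is unique' flag (radix-style two-pass stable sort), and drops the empty-input guard.
import Mathlib
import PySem

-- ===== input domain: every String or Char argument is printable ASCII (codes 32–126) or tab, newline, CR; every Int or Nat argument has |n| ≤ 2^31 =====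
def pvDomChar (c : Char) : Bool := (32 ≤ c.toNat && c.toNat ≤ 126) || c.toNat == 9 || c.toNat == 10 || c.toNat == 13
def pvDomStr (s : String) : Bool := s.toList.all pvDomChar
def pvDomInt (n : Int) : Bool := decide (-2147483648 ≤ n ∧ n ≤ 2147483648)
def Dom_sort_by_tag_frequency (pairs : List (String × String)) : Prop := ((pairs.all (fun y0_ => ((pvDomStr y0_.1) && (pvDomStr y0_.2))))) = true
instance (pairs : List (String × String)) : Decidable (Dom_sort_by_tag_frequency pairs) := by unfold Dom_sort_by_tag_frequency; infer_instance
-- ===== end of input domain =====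

-- B replaces A's partition-into-two-lists + two sorts by one lexicographic sort followed by a
-- stable re-sort on the boolean "value is unique" flag (two-pass stable sort); objective: simpler.

-- ===== PORT A =====
def sort_by_tag_frequency (pairs : List (String × String)) : List (String × String) :=
  if pairs = [] then []
  else
    let value_count := PySem.Dict.counter (pairs.map (fun vk => vk.1))
    let dw := pairs.foldl
      (fun (acc : List (String × String) × List (String × String)) vk =>
        if 2 ≤ value_count.getD vk.1 0 then (acc.1 ++ [vk], acc.2) else (acc.1, acc.2 ++ [vk]))
      ([], [])
    PySem.List.sorted2 dw.1 (fun x => x.1) (fun x => x.2) ++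
      PySem.List.sorted2 dw.2 (fun x => x.1) (fun x => x.2)

-- ===== PORT B =====
def sort_by_tag_frequency_alt (pairs : List (String × String)) : List (String × String) :=
  let value_count := PySem.Dict.counter (pairs.map (fun vk => vk.1))
  let ordered := PySem.List.sorted2 pairs (fun x => x.1) (fun x => x.2)
  PySem.List.sorted ordered (fun p => decide (value_count.getD p.1 0 < 2))

-- ===== PRECONDITION & SPEC =====
def Spec_sort_by_tag_frequency (pairs : List (String × String)) (out : List (String × String)) : Prop := out = sort_by_tag_frequency_alt pairs
instance (pairs : List (String × String)) (out : List (String × String)) : Decidable (Spec_sort_by_tag_frequency pairs out) := by unfold Spec_sort_by_tag_frequency; infer_instance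

-- ===== CLAIM (what is proved, stated in full; the proofs are below) =====
def Claim_equal_sort_by_tag_frequency : Prop := ∀ (pairs : List (String × String)), Dom_sort_by_tag_frequency pairs → Spec_sort_by_tag_frequency pairs (sort_by_tag_frequency pairs)

-- ===== LEMMAS AND PROOFS =====

-- a "before" comparator that is asymmetric and for which x<a ∧ a≤y implies x<y (a strict weak order)
def BefOK {α : Type} (bef : α → α → Bool) : Prop :=
  (∀ a b, bef a b = true → bef b a = false) ∧
  (∀ x a y, bef x a = true → bef y a = false → bef x y = true)

theorem insertBy_append_not_before {α : Type} (bef : α → α → Bool) (x : α) (a0 a1 : List α)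
    (h : ∀ y ∈ a0, bef x y = false) :
    PySem.List.insertBy bef x (a0 ++ a1) = a0 ++ PySem.List.insertBy bef x a1 := by
  induction a0 with
  | nil => simp
  | cons a t ih =>
    have ha := h a (by simp)
    simp [PySem.List.insertBy, ha, ih (fun y hy => h y (by simp [hy]))]

theorem insertBy_forall_before {α : Type} (bef : α → α → Bool) (x : α) (l : List α)
    (h : ∀ y ∈ l, bef x y = true) :
    PySem.List.insertBy bef x l = x :: l := by
  cases l with
  | nil => rfl
  | cons a t => simp [PySem.List.insertBy, h a (by simp)]

theorem pairwise_insertBy {α : Type} (bef : α → α → Bool) (hok : BefOK bef) (x : α)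
    (acc : List α) (hpw : acc.Pairwise (fun a b => bef b a = false)) :
    (PySem.List.insertBy bef x acc).Pairwise (fun a b => bef b a = false) := by
  induction acc with
  | nil => simp [PySem.List.insertBy]
  | cons a t ih =>
    rw [List.pairwise_cons] at hpw
    obtain ⟨ha, hpw'⟩ := hpw
    by_cases hxa : bef x a = true
    · rw [show PySem.List.insertBy bef x (a :: t) = x :: a :: t by simp [PySem.List.insertBy, hxa]]
      refine List.pairwise_cons.mpr ⟨?_, List.pairwise_cons.mpr ⟨ha, hpw'⟩⟩
      intro y hy
      rcases List.mem_cons.mp hy with rfl | hy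
      · exact hok.1 _ _ hxa
      · exact hok.1 _ _ (hok.2 x a y hxa (ha y hy))
    · rw [show PySem.List.insertBy bef x (a :: t) = a :: PySem.List.insertBy bef x t by
        simp [PySem.List.insertBy, Bool.eq_false_iff.mpr hxa]]
      refine List.pairwise_cons.mpr ⟨?_, ih hpw'⟩
      intro y hy
      rcases (PySem.List.mem_insertBy bef x y t).mp hy with rfl | hy
      · exact Bool.eq_false_iff.mpr hxa
      · exact ha y hy

theorem filter_insertBy {α : Type} (bef : α → α → Bool) (hok : BefOK bef) (p : α → Bool) (x : α)
    (acc : List α) (hpw : acc.Pairwise (fun a b => bef b a = false)) :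
    (PySem.List.insertBy bef x acc).filter p =
      if p x then PySem.List.insertBy bef x (acc.filter p) else acc.filter p := by
  induction acc with
  | nil => cases hpx : p x <;> simp [PySem.List.insertBy, hpx]
  | cons a t ih =>
    rw [List.pairwise_cons] at hpw
    obtain ⟨ha, hpw'⟩ := hpw
    by_cases hxa : bef x a = true
    · rw [show PySem.List.insertBy bef x (a :: t) = x :: a :: t by simp [PySem.List.insertBy, hxa]]
      cases hpx : p x with
      | false => simp [List.filter_cons, hpx]
      | true =>
        have hall : ∀ y ∈ (a :: t).filter p, bef x y = true := by
          intro y hy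
          rcases List.mem_cons.mp (List.mem_of_mem_filter hy) with rfl | hy'
          · exact hxa
          · exact hok.2 x a y hxa (ha y hy')
        rw [insertBy_forall_before bef x _ hall]
        simp [List.filter_cons, hpx]
    · rw [show PySem.List.insertBy bef x (a :: t) = a :: PySem.List.insertBy bef x t by
        simp [PySem.List.insertBy, Bool.eq_false_iff.mpr hxa]]
      cases hpa : p a with
      | true =>
        cases hpx : p x with
        | true =>
          rw [List.filter_cons_of_pos hpa, ih hpw']
          rw [List.filter_cons_of_pos hpa,
            show PySem.List.insertBy bef x (a :: t.filter p)
              = a :: PySem.List.insertBy bef x (t.filter p) by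
              simp [PySem.List.insertBy, Bool.eq_false_iff.mpr hxa]]
          simp [hpx]
        | false =>
          rw [List.filter_cons_of_pos hpa, ih hpw']
          simp [hpx, List.filter_cons_of_pos hpa]
      | false =>
        simp only [List.filter_cons, hpa, Bool.false_eq_true, if_false]
        exact ih hpw'

theorem filter_foldl_insertBy {α : Type} (bef : α → α → Bool) (hok : BefOK bef) (p : α → Bool)
    (l : List α) (acc : List α) (hpw : acc.Pairwise (fun a b => bef b a = false)) :
    (l.foldl (fun acc x => PySem.List.insertBy bef x acc) acc).filter p =
      (l.filter p).foldl (fun acc x => PySem.List.insertBy bef x acc) (acc.filter p) := by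
  induction l generalizing acc with
  | nil => simp
  | cons x t ih =>
    rw [List.foldl_cons, ih _ (pairwise_insertBy bef hok x acc hpw),
      filter_insertBy bef hok p x acc hpw]
    cases hpx : p x with
    | true => simp [hpx]
    | false => simp [hpx]

-- the lexicographic comparator used by sorted2 is a strict weak order
theorem lexBef_ok {α κ₁ κ₂ : Type} [LinearOrder κ₁] [LinearOrder κ₂] (k1 : α → κ₁) (k2 : α → κ₂) :
    BefOK (fun a b => decide (k1 a < k1 b) || (!decide (k1 b < k1 a) && decide (k2 a < k2 b))) := by
  constructor
  · intro a b h
    simp only [Bool.or_eq_true, Bool.and_eq_true, Bool.not_eq_true', decide_eq_true_eq,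
      decide_eq_false_iff_not, Bool.or_eq_false_iff, Bool.and_eq_false_iff,
      Bool.not_eq_false'] at *
    rcases h with h | ⟨h1, h2⟩
    · exact ⟨lt_asymm h, Or.inl (by simpa using h)⟩
    · exact ⟨h1, Or.inr (by simpa using lt_asymm h2)⟩
  · intro x a y hxa hya
    simp only [Bool.or_eq_true, Bool.and_eq_true, Bool.not_eq_true', decide_eq_true_eq,
      decide_eq_false_iff_not, Bool.or_eq_false_iff, Bool.and_eq_false_iff,
      Bool.not_eq_false'] at *
    obtain ⟨hya1, hya2⟩ := hya
    rcases hxa with h | ⟨h1, h2⟩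
    · exact Or.inl (lt_of_lt_of_le h (le_of_not_gt hya1))
    · rcases hya2 with hy | hy
      · have hy' : k1 a < k1 y := by simpa using hy
        exact Or.inl (lt_of_le_of_lt (le_of_not_gt h1) hy')
      · by_cases hay : k1 a < k1 y
        · exact Or.inl (lt_of_le_of_lt (le_of_not_gt h1) hay)
        · refine Or.inr ⟨fun hyx => hya1 (lt_of_lt_of_le hyx (le_of_not_gt h1)), ?_⟩
          exact lt_of_lt_of_le h2 (le_of_not_gt (by simpa using hy))

-- a stable sort by a Bool key partitions: false-flagged elements first, each side in list order
theorem foldl_insertBy_boolKey {α : Type} (key : α → Bool) :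
    ∀ (l a0 a1 : List α), (∀ y ∈ a0, key y = false) → (∀ y ∈ a1, key y = true) →
    l.foldl (fun acc x => PySem.List.insertBy (fun a b => decide (key a < key b)) x acc) (a0 ++ a1)
      = (a0 ++ l.filter (fun x => !key x)) ++ (a1 ++ l.filter (fun x => key x)) := by
  intro l
  induction l with
  | nil => intro a0 a1 _ _; simp
  | cons x t ih =>
    intro a0 a1 h0 h1
    rw [List.foldl_cons]
    cases hx : key x with
    | false =>
      have e1 : PySem.List.insertBy (fun a b => decide (key a < key b)) x (a0 ++ a1)
          = (a0 ++ [x]) ++ a1 := by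
        rw [insertBy_append_not_before _ _ _ _
          (fun y hy => by simp [hx, h0 y hy]),
          insertBy_forall_before _ _ _
          (fun y hy => by simp [hx, h1 y hy, Bool.lt_iff])]
        simp
      rw [e1, ih (a0 ++ [x]) a1
        (by intro y hy; rcases List.mem_append.mp hy with hy | hy
            · exact h0 y hy
            · simp at hy; subst hy; exact hx) h1]
      simp [hx]
    | true =>
      have e1 : PySem.List.insertBy (fun a b => decide (key a < key b)) x (a0 ++ a1)
          = a0 ++ (a1 ++ [x]) := by
        rw [← List.append_assoc]
        exact PySem.List.insertBy_of_forall_not_before _ _ _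
          (fun y hy => by cases hky : key y <;> simp [hx, Bool.lt_iff])
      rw [e1, ih a0 (a1 ++ [x]) h0
        (by intro y hy; rcases List.mem_append.mp hy with hy | hy
            · exact h1 y hy
            · simp at hy; subst hy; exact hx)]
      simp [hx]

-- filter commutes with sorted2 (stability)
theorem filter_sorted2 (p : String × String → Bool) (pairs : List (String × String)) :
    (PySem.List.sorted2 pairs (fun x => x.1) (fun x => x.2)).filter p
      = PySem.List.sorted2 (pairs.filter p) (fun x => x.1) (fun x => x.2) := by
  have e : ∀ (l : List (String × String)), PySem.List.sorted2 l (fun x => x.1) (fun x => x.2)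
      = l.foldl (fun acc x => PySem.List.insertBy
          (fun a b => decide (a.1 < b.1) || (!decide (b.1 < a.1) && decide (a.2 < b.2))) x acc) [] :=
    fun l => rfl
  rw [e, e, filter_foldl_insertBy _ (lexBef_ok (fun x : String × String => x.1) (fun x => x.2))
    p pairs [] (by simp)]
  rfl

-- the partition loop is two filters
theorem partition_foldl {α : Type} (P : α → Prop) [DecidablePred P] (l : List α)
    (acc : List α × List α) :
    l.foldl (fun acc x => if P x then (acc.1 ++ [x], acc.2) else (acc.1, acc.2 ++ [x])) acc
      = (acc.1 ++ l.filter (fun x => decide (P x)), acc.2 ++ l.filter (fun x => !decide (P x))) := by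
  induction l generalizing acc with
  | nil => simp
  | cons x t ih =>
    rw [List.foldl_cons, ih]
    by_cases h : P x <;> simp [h]

theorem sort_by_tag_frequency_eq (pairs : List (String × String)) :
    sort_by_tag_frequency pairs = sort_by_tag_frequency_alt pairs := by
  by_cases hnil : pairs = []
  · subst hnil; rfl
  · have cnt := PySem.Dict.counter (pairs.map (fun vk : String × String => vk.1))
    set c := PySem.Dict.counter (pairs.map (fun vk : String × String => vk.1)) with hc
    have hA : sort_by_tag_frequency pairs
        = PySem.List.sorted2
            ((pairs.foldl (fun acc vk =>
                if 2 ≤ c.getD vk.1 0 then (acc.1 ++ [vk], acc.2) else (acc.1, acc.2 ++ [vk]))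
              ([], [])).1) (fun x => x.1) (fun x => x.2)
          ++ PySem.List.sorted2
            ((pairs.foldl (fun acc vk =>
                if 2 ≤ c.getD vk.1 0 then (acc.1 ++ [vk], acc.2) else (acc.1, acc.2 ++ [vk]))
              ([], [])).2) (fun x => x.1) (fun x => x.2) := by
      unfold sort_by_tag_frequency
      rw [if_neg hnil]
    have hB : sort_by_tag_frequency_alt pairs
        = PySem.List.sorted (PySem.List.sorted2 pairs (fun x => x.1) (fun x => x.2))
            (fun p => decide (c.getD p.1 0 < 2)) := rfl
    have hsplit := partition_foldl (fun vk : String × String => 2 ≤ c.getD vk.1 0) pairs ([], [])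
    rw [hA, hB, hsplit]
    -- B: boolean-key stable sort = partition of the lexicographically sorted list
    have hb : PySem.List.sorted (PySem.List.sorted2 pairs (fun x => x.1) (fun x => x.2))
        (fun p => decide (c.getD p.1 0 < 2))
        = (PySem.List.sorted2 pairs (fun x => x.1) (fun x => x.2)).filter
            (fun x => !decide (c.getD x.1 0 < 2))
          ++ (PySem.List.sorted2 pairs (fun x => x.1) (fun x => x.2)).filter
            (fun x => decide (c.getD x.1 0 < 2)) := by
      rw [PySem.List.sorted_eq_foldl_insertBy]
      have := foldl_insertBy_boolKey (fun p : String × String => decide (c.getD p.1 0 < 2))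
        (PySem.List.sorted2 pairs (fun x => x.1) (fun x => x.2)) [] []
        (by simp) (by simp)
      simpa using this
    rw [hb, filter_sorted2, filter_sorted2]
    -- align the two filter predicates (2 ≤ n vs ¬ n < 2)
    have hpred1 : pairs.filter (fun x => !decide (c.getD x.1 0 < 2))
        = pairs.filter (fun vk => decide (2 ≤ c.getD vk.1 0)) := by
      apply List.filter_congr
      intro x _
      by_cases h : c.getD x.1 0 < 2 <;> simp [h, not_lt.mpr, le_of_lt] <;> omega
    have hpred2 : pairs.filter (fun x => decide (c.getD x.1 0 < 2))
        = pairs.filter (fun vk => !decide (2 ≤ c.getD vk.1 0)) := by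
      apply List.filter_congr
      intro x _
      by_cases h : c.getD x.1 0 < 2 <;> simp [h] <;> omega
    rw [hpred1, hpred2]
    simp

-- ===== VERDICT (by name: the statement is the Claim_ definition above) =====
theorem sort_by_tag_frequency_spec : Claim_equal_sort_by_tag_frequency := by
  intro pairs _
  unfold Spec_sort_by_tag_frequency
  exact sort_by_tag_frequency_eq pairs
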